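-- pv_equiv track=rewrite | github.com/A-Kuklin/LeetCode_42 | trapping-2-attempt.py | half_trap
-- ===== SOURCE A (Python) =====
-- import typing as t
--
-- def half_trap(height: t.List[int]) -> int:
--     small_peak = 0
--     volume = 0
--     for h in height:
--         if h < small_peak:
--             volume += small_peak - h
--         else:
--             small_peak = h
--     return volume
-- ===== SOURCE B (Python) =====
-- import typing as t
--
-- def half_trap(height: t.List[int]) -> int:
--     # Build the running left-peak table (floored at 0), then sum the gaps.
--     pm = []
--     m = 0
--     for h in height:
--         if h > m:
--             m = h
--         pm.append(m)
--     return sum(p - h for p, h in zip(pm, height))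
-- ===== Notes on version B (the rewrite author's own statement) =====
-- stated objective: alternative
-- what changed: B materialises the 0-floored prefix-maximum table in one pass and computes the answer as a separate sum of pm[i]-height[i], replacing A's single conditional accumulator pass.
import Mathlib
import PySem

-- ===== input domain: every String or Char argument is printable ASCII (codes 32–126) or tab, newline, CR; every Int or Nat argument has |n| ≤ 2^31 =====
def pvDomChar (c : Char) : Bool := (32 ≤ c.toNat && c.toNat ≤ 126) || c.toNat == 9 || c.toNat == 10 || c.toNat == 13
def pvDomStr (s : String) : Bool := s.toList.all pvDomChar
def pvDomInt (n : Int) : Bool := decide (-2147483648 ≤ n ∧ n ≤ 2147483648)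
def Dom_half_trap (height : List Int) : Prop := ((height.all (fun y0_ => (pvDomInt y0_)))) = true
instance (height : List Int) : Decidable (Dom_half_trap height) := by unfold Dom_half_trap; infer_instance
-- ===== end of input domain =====

-- ===== PORT A =====
-- literal port of A: single pass carrying (small_peak, volume)
def half_trap (height : List Int) : Int :=
  (height.foldl
    (fun (s : Int × Int) h =>
      if h < s.1 then (s.1, s.2 + (s.1 - h)) else (h, s.2))
    (0, 0)).2

-- ===== PORT B =====
-- B: build the 0-floored prefix-max table, then sum the gaps
def prefixMax : Int → List Int → List Int
  | _, [] => []
  | m, h :: t =>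
    let m' := if h > m then h else m
    m' :: prefixMax m' t

def half_trap_alt (height : List Int) : Int :=
  (List.zipWith (fun p h => p - h) (prefixMax 0 height) height).sum

-- ===== PRECONDITION & SPEC =====
def Spec_half_trap (height : List Int) (out : Int) : Prop := out = half_trap_alt height
instance (height : List Int) (out : Int) : Decidable (Spec_half_trap height out) := by unfold Spec_half_trap; infer_instance

-- ===== CLAIM (what is proved, stated in full; the proofs are below) =====
def Claim_equal_half_trap : Prop := ∀ (height : List Int), Dom_half_trap height → Spec_half_trap height (half_trap height)

-- ===== LEMMAS AND PROOFS =====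

-- ===== VERDICT (by name: the statement is the Claim_ definition above) =====
theorem halfTrap_inv (t : List Int) : ∀ (m v : Int),
    (t.foldl
      (fun (s : Int × Int) h =>
        if h < s.1 then (s.1, s.2 + (s.1 - h)) else (h, s.2))
      (m, v)).2
      = v + (List.zipWith (fun p h => p - h) (prefixMax m t) t).sum := by
  induction t with
  | nil => intro m v; simp
  | cons h t ih =>
    intro m v
    by_cases hc : h < m
    · have hm' : (if h > m then h else m) = m := by omega
      simp [prefixMax, hc, hm', ih]
      ring
    · have hm' : (if h > m then h else m) = h := by omega
      simp [prefixMax, hc, hm', ih]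

theorem half_trap_spec : Claim_equal_half_trap := by
  intro height _
  unfold Spec_half_trap half_trap half_trap_alt
  simpa using halfTrap_inv height 0 0
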